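-- pv_equiv track=rewrite | github.com/devv2sloww/blasxjfdsf | hi.py | sort_words_by_suffix
-- ===== SOURCE A (Python) =====
-- from collections import defaultdict
--
-- def sort_words_by_suffix(words, suffixes):
--     sorted_words = defaultdict(list)
--     for word in words:
--         for suffix in suffixes:
--             if word.endswith(suffix):
--                 base_word = word[: -len(suffix)]
--                 sorted_words[suffix].append(base_word)
--                 break
--     return sorted_words
-- ===== SOURCE B (Python) =====
-- def sort_words_by_suffix(words, suffixes):
--     # index each distinct suffix by its first position in the suffix list
--     first_idx = {}
--     for i, s in enumerate(suffixes):
--         if s not in first_idx: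
--             first_idx[s] = i
--     groups = {}
--     for w in words:
--         best = None
--         for k in range(len(w) + 1):
--             j = first_idx.get(w[k:])
--             if j is not None and (best is None or j < best):
--                 best = j
--         if best is not None:
--             s = suffixes[best]
--             groups.setdefault(s, []).append(w[: -len(s)])
--     return groups
-- ===== Notes on version B (the rewrite author's own statement) =====
-- stated objective: faster
-- what changed: B builds a hash map from each distinct suffix to its first index once, then for each word looks up only that word's own trailing slices and keeps the minimal index, replacing A's per-word linear endswith-scan of the whole suffix list.
import Mathlib
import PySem

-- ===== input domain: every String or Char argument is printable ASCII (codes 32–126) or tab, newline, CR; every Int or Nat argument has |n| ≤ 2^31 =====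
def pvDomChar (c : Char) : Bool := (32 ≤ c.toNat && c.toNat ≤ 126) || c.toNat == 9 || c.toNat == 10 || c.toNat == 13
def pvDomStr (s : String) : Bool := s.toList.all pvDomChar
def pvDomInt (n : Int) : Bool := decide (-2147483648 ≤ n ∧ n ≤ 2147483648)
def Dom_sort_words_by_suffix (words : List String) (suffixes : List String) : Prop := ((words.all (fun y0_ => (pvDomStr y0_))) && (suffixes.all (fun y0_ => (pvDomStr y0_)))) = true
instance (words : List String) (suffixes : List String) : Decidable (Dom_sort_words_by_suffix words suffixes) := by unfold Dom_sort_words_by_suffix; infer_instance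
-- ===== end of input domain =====

-- B replaces A's per-word endswith-scan of the whole suffix list by a one-time first-index map of
-- the suffixes, looked up on each word's own trailing slices (measured faster; same return value).

-- ===== PORT A =====
-- inner 'for suffix in suffixes: if word.endswith(suffix): … break'
def pvFindSuffix (w : String) : List String → Option String
  | [] => none
  | s :: rest => if PySem.Str.endswith w s then some s else pvFindSuffix w rest

def sort_words_by_suffix (words : List String) (suffixes : List String) : List (String × List String) :=
  (words.foldl (fun d w =>
      match pvFindSuffix w suffixes with
      | some s => d.modify s [] (fun l => l ++ [PySem.Str.slice w none (some (-(PySem.Str.len s)))])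
      | none => d)
    PySem.Dict.empty).items

-- ===== PORT B =====
-- 'for i, s in enumerate(suffixes): if s not in first_idx: first_idx[s] = i'
def pvFirstIdx (suffixes : List String) : PySem.Dict String Int :=
  (PySem.List.enumerate suffixes 0).foldl
    (fun d p => if d.contains p.2 then d else d.insert p.2 p.1) PySem.Dict.empty

-- 'for k in range(len(w) + 1): j = first_idx.get(w[k:]); if j is not None and (best is None or j < best): best = j'
def pvBest (fi : PySem.Dict String Int) (w : String) : Option Int :=
  (PySem.List.pyRange 0 (PySem.Str.len w + 1) 1).foldl
    (fun best k =>
      match fi.get? (PySem.Str.slice w (some k) none) with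
      | none => best
      | some j =>
        match best with
        | none => some j
        | some b => if j < b then some j else some b)
    none

def sort_words_by_suffix_alt (words : List String) (suffixes : List String) : List (String × List String) :=
  let fi := pvFirstIdx suffixes
  (words.foldl (fun d w =>
      match pvBest fi w with
      | some best =>
        let s := PySem.List.pyGetD suffixes best ""
        d.modify s [] (fun l => l ++ [PySem.Str.slice w none (some (-(PySem.Str.len s)))])
      | none => d)
    PySem.Dict.empty).items

-- ===== PRECONDITION & SPEC =====
def Spec_sort_words_by_suffix (words : List String) (suffixes : List String) (out : List (String × List String)) : Prop := out = sort_words_by_suffix_alt words suffixes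
instance (words : List String) (suffixes : List String) (out : List (String × List String)) : Decidable (Spec_sort_words_by_suffix words suffixes out) := by unfold Spec_sort_words_by_suffix; infer_instance

-- ===== CLAIM (what is proved, stated in full; the proofs are below) =====
def Claim_equal_sort_words_by_suffix : Prop := ∀ (words : List String) (suffixes : List String), Dom_sort_words_by_suffix words suffixes → Spec_sort_words_by_suffix words suffixes (sort_words_by_suffix words suffixes)

-- ===== LEMMAS AND PROOFS =====

-- A's inner loop is List.find?
theorem pvFindSuffix_eq_find? (w : String) (l : List String) :
    pvFindSuffix w l = l.find? (fun s => PySem.Str.endswith w s) := by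
  induction l with
  | nil => rfl
  | cons s rest ih =>
    by_cases h : PySem.Str.endswith w s = true
    · simp only [pvFindSuffix, if_pos h]
      exact (List.find?_cons_of_pos (by simpa using h)).symm
    · simp only [Bool.not_eq_true] at h
      simp only [pvFindSuffix, h, Bool.false_eq_true, if_false, ih]
      exact (List.find?_cons_of_neg (by simpa using h)).symm

-- the first-index map: get? = first occurrence index in the suffix list
theorem pvFirstIdx_invariant (s : String) (l : List String) :
    ∀ (n : Int) (d : PySem.Dict String Int),
      ((PySem.List.enumerate l n).foldl
          (fun d p => if d.contains p.2 then d else d.insert p.2 p.1) d).get? s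
        = if d.contains s then d.get? s
          else (PySem.List.index? l s).map (fun k : Nat => n + (k : Int)) := by
  induction l with
  | nil =>
    intro n d
    simp [PySem.List.enumerate]
    intro h
    rw [PySem.Dict.contains_eq_isSome_get?] at h
    cases hg : d.get? s with
    | none => rfl
    | some v => rw [hg] at h; simp at h
  | cons x rest ih =>
    intro n d
    rw [PySem.List.enumerate_cons]
    simp only [List.foldl_cons]
    by_cases hx : d.contains x = true
    · rw [if_pos hx, ih]
      by_cases hs : s = x
      · subst hs; rw [if_pos hx, if_pos hx]
      · have hxs : x ≠ s := fun h => hs h.symm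
        rw [PySem.List.index?_cons_of_ne _ hxs]
        by_cases hd : d.contains s = true
        · rw [if_pos hd, if_pos hd]
        · rw [if_neg hd, if_neg hd]
          cases hi : PySem.List.index? rest s with
          | none => simp
          | some k => simp; omega
    · rw [if_neg hx, ih]
      by_cases hs : s = x
      · subst hs
        have hc : (d.insert s n).contains s = true := by
          rw [PySem.Dict.contains_eq_isSome_get?, PySem.Dict.get?_insert_self]; rfl
        rw [if_pos hc, if_neg hx, PySem.Dict.get?_insert_self,
          PySem.List.index?_cons_self]
        simp
      · have hxs : x ≠ s := fun h => hs h.symm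
        have hc : (d.insert x n).contains s = d.contains s := by
          rw [PySem.Dict.contains_eq_isSome_get?, PySem.Dict.contains_eq_isSome_get?,
            PySem.Dict.get?_insert_of_ne _ _ hs]
        rw [hc, PySem.Dict.get?_insert_of_ne _ _ hs,
          PySem.List.index?_cons_of_ne _ hxs]
        by_cases hd : d.contains s = true
        · rw [if_pos hd, if_pos hd]
        · rw [if_neg hd, if_neg hd]
          cases hi : PySem.List.index? rest s with
          | none => simp
          | some k => simp; omega

theorem pvFirstIdx_get? (suffixes : List String) (s : String) :
    (pvFirstIdx suffixes).get? s = (PySem.List.index? suffixes s).map (fun k : Nat => (k : Int)) := by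
  rw [pvFirstIdx, pvFirstIdx_invariant, if_neg (by simp [PySem.Dict.contains_empty])]
  cases PySem.List.index? suffixes s with
  | none => rfl
  | some k => simp

-- option-min combinator and the min-fold characterisation
def pvMergeMin : Option Int → Option Int → Option Int
  | none, b => b
  | some a, none => some a
  | some a, some b => some (min a b)

theorem pvMergeMin_step (b : Option Int) (j? : Option Int) :
    (match j? with
      | none => b
      | some j =>
        match b with
        | none => some j
        | some b0 => if j < b0 then some j else some b0) = pvMergeMin b j? := by
  cases j? with
  | none => cases b <;> rfl
  | some j =>
    cases b with
    | none => rfl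
    | some b0 =>
      simp only [pvMergeMin]
      split_ifs with h <;> (congr 1; omega)

-- the candidate at split point k : the first-occurrence index of w[k:] in the suffix list
def pvCand (suffixes : List String) (w : String) (k : Nat) : Option Int :=
  ((pvFirstIdx suffixes).get? (PySem.Str.slice w (some (k : Int)) none))

theorem pvBest_eq_min? (suffixes : List String) (w : String) :
    pvBest (pvFirstIdx suffixes) w
      = ((List.range (w.toList.length + 1)).filterMap (pvCand suffixes w)).min? := by
  rw [pvBest]
  have h1 : PySem.Str.len w + 1 = ((w.toList.length + 1 : Nat) : Int) := by
    rw [PySem.Str.len_eq]; push_cast; ring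
  rw [h1, PySem.List.pyRange_zero_natCast, List.foldl_map]
  have h2 : (fun (best : Option Int) (k : Nat) =>
      (match (pvFirstIdx suffixes).get? (PySem.Str.slice w (some (k : Int)) none) with
        | none => best
        | some j =>
          match best with
          | none => some j
          | some b => if j < b then some j else some b))
      = fun best k => pvMergeMin best (pvCand suffixes w k) := by
    funext best k
    rw [pvMergeMin_step]
    rfl
  rw [h2]
  -- the same min-fold, over Nat indices
  have h3 : ∀ (ks : List Nat) (acc : Option Int),
      ks.foldl (fun b k => pvMergeMin b (pvCand suffixes w k)) acc
        = pvMergeMin acc ((ks.filterMap (pvCand suffixes w)).min?) := by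
    intro ks
    induction ks with
    | nil => intro acc; cases acc <;> rfl
    | cons k ks ih =>
      intro acc
      simp only [List.foldl_cons, List.filterMap_cons]
      rw [ih]
      cases hk : pvCand suffixes w k with
      | none => cases acc <;> rfl
      | some j =>
        rw [List.min?_cons]
        cases hm : (ks.filterMap (pvCand suffixes w)).min? with
        | none => cases acc <;> simp [pvMergeMin, Option.elim]
        | some m => cases acc <;> simp [pvMergeMin, Option.elim]
  rw [h3]
  rfl

-- w[k:] as a string equals drop k of the characters
theorem pvSliceFrom_toList (w : String) (k : Nat) :
    (PySem.Str.slice w (some (k : Int)) none).toList = w.toList.drop k := by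
  rw [PySem.Str.toList_slice, PySem.Chars.slice_eq_listSlice, PySem.List.slice_from_natCast]

-- a candidate hit means the found suffix string really is a suffix of w
theorem pvCand_some (suffixes : List String) (w : String) (k : Nat) (m : Int)
    (h : pvCand suffixes w k = some m) :
    ∃ (mn : Nat) (hm : mn < suffixes.length), m = (mn : Int) ∧
      PySem.Str.endswith w suffixes[mn] = true ∧
      (∀ j (hj : j < mn), suffixes[j] ≠ suffixes[mn]) := by
  rw [pvCand, pvFirstIdx_get?] at h
  cases hi : PySem.List.index? suffixes (PySem.Str.slice w (some (k : Int)) none) with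
  | none => rw [hi] at h; simp at h
  | some mn =>
    rw [hi] at h
    simp only [Option.map_some, Option.some.injEq] at h
    obtain ⟨hm, hv, hfirst⟩ := PySem.List.getElem_of_index?_eq_some hi
    refine ⟨mn, hm, h.symm, ?_, ?_⟩
    · rw [PySem.Str.endswith_eq, PySem.Chars.endswith_iff, hv, pvSliceFrom_toList]
      exact List.drop_suffix k w.toList
    · intro j hj heq
      exact absurd (heq.trans hv) (hfirst j hj)
  
-- the first matching index is itself a candidate (at k = |w| - |suffix|)
theorem pvCand_mem (suffixes : List String) (w : String) (i : Nat)
    (hi : i < suffixes.length)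
    (hp : PySem.Str.endswith w suffixes[i] = true)
    (hfirst : ∀ j (hj : j < i), ¬ PySem.Str.endswith w suffixes[j] = true) :
    pvCand suffixes w (w.toList.length - suffixes[i].toList.length) = some (i : Int) := by
  have hsfx : suffixes[i].toList <:+ w.toList := by
    rw [PySem.Str.endswith_eq, PySem.Chars.endswith_iff] at hp
    exact hp
  have hdrop : w.toList.drop (w.toList.length - suffixes[i].toList.length) = suffixes[i].toList :=
    (List.suffix_iff_eq_drop.mp hsfx).symm
  have hslice : PySem.Str.slice w (some ((w.toList.length - suffixes[i].toList.length : Nat) : Int)) none = suffixes[i] := by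
    apply String.toList_injective
    rw [pvSliceFrom_toList, hdrop]
  rw [pvCand, pvFirstIdx_get?, hslice]
  have hidx : PySem.List.index? suffixes suffixes[i] = some i := by
    rw [PySem.List.index?_eq_some_iff]
    refine ⟨suffixes.take i, suffixes.drop (i + 1), ?_, ?_, ?_⟩
    · conv_lhs => rw [← List.take_append_drop i suffixes]
      rw [List.drop_eq_getElem_cons hi]
    · exact List.length_take_of_le (Nat.le_of_lt hi)
    · intro hmem
      rw [List.mem_take_iff_getElem] at hmem
      obtain ⟨j, hj, hval⟩ := hmem
      have hji : j < i := lt_of_lt_of_le hj (min_le_left _ _)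
      exact hfirst j hji (by rw [hval]; exact hp)
  rw [hidx]
  rfl

-- THE CRUX: B's best index is A's first matching suffix index
theorem pvBest_eq_findIdx? (suffixes : List String) (w : String) :
    pvBest (pvFirstIdx suffixes) w
      = (suffixes.findIdx? (fun s => PySem.Str.endswith w s)).map (fun n : Nat => (n : Int)) := by
  rw [pvBest_eq_min?]
  cases hf : suffixes.findIdx? (fun s => PySem.Str.endswith w s) with
  | none =>
    rw [List.findIdx?_eq_none_iff] at hf
    have hnil : (List.range (w.toList.length + 1)).filterMap (pvCand suffixes w) = [] := by
      rw [List.filterMap_eq_nil_iff]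
      intro k _
      cases hc : pvCand suffixes w k with
      | none => rfl
      | some m =>
        obtain ⟨mn, hm, _, hp, _⟩ := pvCand_some suffixes w k m hc
        have := hf suffixes[mn] (List.getElem_mem hm)
        rw [hp] at this
        simp at this
    rw [hnil]
    rfl
  | some i =>
    rw [List.findIdx?_eq_some_iff_getElem] at hf
    obtain ⟨hi, hp, hfirst⟩ := hf
    have hfirst' : ∀ j (hj : j < i), ¬ PySem.Str.endswith w suffixes[j] = true := by
      intro j hj
      have := hfirst j hj
      simpa using this
    simp only [Option.map_some]
    rw [List.min?_eq_some_iff]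
    constructor
    · rw [List.mem_filterMap]
      refine ⟨w.toList.length - suffixes[i].toList.length, ?_, ?_⟩
      · rw [List.mem_range]
        omega
      · exact pvCand_mem suffixes w i hi hp hfirst'
    · intro b hb
      rw [List.mem_filterMap] at hb
      obtain ⟨k, _, hc⟩ := hb
      obtain ⟨mn, hm, hbm, hpm, _⟩ := pvCand_some suffixes w k b hc
      have himn : i ≤ mn := by
        by_contra hlt
        exact hfirst' mn (by omega) hpm
      subst hbm
      exact_mod_cast himn

-- per-word step agreement
theorem pvStep_eq (suffixes : List String) (d : PySem.Dict String (List String)) (w : String) :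
    (match pvBest (pvFirstIdx suffixes) w with
      | some best =>
        let s := PySem.List.pyGetD suffixes best ""
        d.modify s [] (fun l => l ++ [PySem.Str.slice w none (some (-(PySem.Str.len s)))])
      | none => d)
    = (match pvFindSuffix w suffixes with
      | some s => d.modify s [] (fun l => l ++ [PySem.Str.slice w none (some (-(PySem.Str.len s)))])
      | none => d) := by
  rw [pvBest_eq_findIdx?, pvFindSuffix_eq_find?]
  cases hf : suffixes.findIdx? (fun s => PySem.Str.endswith w s) with
  | none =>
    have : suffixes.find? (fun s => PySem.Str.endswith w s) = none := by
      rw [List.find?_eq_none]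
      rw [List.findIdx?_eq_none_iff] at hf
      intro x hx
      simpa using hf x hx
    rw [this]
    rfl
  | some i =>
    rw [List.findIdx?_eq_some_iff_getElem] at hf
    obtain ⟨hi, hp, hfirst⟩ := hf
    have hfind : suffixes.find? (fun s => PySem.Str.endswith w s) = some suffixes[i] := by
      rw [List.find?_eq_some_iff_getElem]
      exact ⟨hp, i, hi, rfl, fun j hj => by simpa using hfirst j hj⟩
    rw [hfind]
    simp only [Option.map_some]
    have hget : PySem.List.pyGetD suffixes ((i : Nat) : Int) "" = suffixes[i] := by
      rw [PySem.List.pyGetD_natCast, List.getD_eq_getElem _ _ hi]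
    rw [hget]

-- ===== VERDICT (by name: the statement is the Claim_ definition above) =====
theorem sort_words_by_suffix_spec : Claim_equal_sort_words_by_suffix := by
  intro words suffixes _
  unfold Spec_sort_words_by_suffix sort_words_by_suffix sort_words_by_suffix_alt
  congr 1
  apply PySem.List.foldl_congr_mem
  intro acc x _
  exact (pvStep_eq suffixes acc x).symm
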